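-- pv_equiv track=rewrite | github.com/benquick123/code-profiling | code/batch-2/dn5 - tviti/M-17141-2344.py | se_poznata
-- ===== SOURCE A (Python) =====
-- def unikati(s):
--     novi = []
--     for e in s:
--         if e not in novi:
--             novi.append(e)
--     return novi
--
-- def avtor(tvit):
--     for e in tvit.split():
--         e = e.replace(":", "")
--         return e
--
-- def vsi_avtorji(tviti):
--     vsi = []
--     for tvit in tviti:
--         vsi.append(avtor(tvit))
--     return unikati(vsi)
--
-- def izloci_besedo(beseda):
--     if beseda.isalnum():
--         return (beseda)
--     else:
--         for i in beseda.strip():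
--             if i.isalnum() is True:
--                 pass
--             else:
--                 if i == "-":
--                     pass
--                 else:
--                     beseda = beseda.replace(i, "")
--         return beseda
--
-- def se_zacne_z_nejceva(tviti, c):
--     rez = []
--     for tvit in tviti:
--         for beseda in tvit.split():
--             if beseda[0] == c:
--                 beseda = izloci_besedo(beseda)
--                 rez.append(beseda)
--     return rez
--
-- def zberi_se_zacne_z(tviti, c):
--     return unikati(se_zacne_z_nejceva(tviti, c))
--
-- def vse_afne(tviti):
--     return zberi_se_zacne_z(tviti, "@")
--
-- def vse_osebe(tviti):
--     return sorted(unikati(vse_afne(tviti) + vsi_avtorji(tviti)))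
--
-- def se_poznata(tviti, oseba1, oseba2):
--
--   if (oseba1 not in vse_osebe(tviti)) | (oseba2 not in vse_osebe(tviti)):
--     return False
--
--   for tvit in tviti:
--     if avtor(tvit) == oseba1:
--       for beseda in tvit.split():
--         if oseba2 == izloci_besedo(beseda):
--           return True
--     elif avtor(tvit) == oseba2:
--       for beseda in tvit.split():
--         if oseba1 == izloci_besedo(beseda):
--           return True
-- ===== SOURCE B (Python) =====
-- def izloci_besedo(beseda):
--     if beseda.isalnum():
--         return (beseda)
--     else:
--         for i in beseda.strip():
--             if i.isalnum() is True:
--                 pass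
--             else:
--                 if i == "-":
--                     pass
--                 else:
--                     beseda = beseda.replace(i, "")
--         return beseda
--
-- def se_poznata(tviti, oseba1, oseba2):
--     # B: one pass over the tweets collecting the set of persons (authors and
--     # cleaned @-mentions) and the whole (author, cleaned word) reference
--     # relation; then answer with set lookups.  Falls off the end (None) on no
--     # match, like the original.
--     osebe = set()
--     refs = set()
--     for tvit in tviti:
--         besede = tvit.split()
--         if not besede:
--             continue
--         a = besede[0].replace(":", "")
--         osebe.add(a)
--         for beseda in besede:
--             if beseda[0] == "@":
--                 osebe.add(izloci_besedo(beseda))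
--             refs.add((a, izloci_besedo(beseda)))
--     if oseba1 not in osebe or oseba2 not in osebe:
--         return False
--     if (oseba1, oseba2) in refs or (oseba2, oseba1) in refs:
--         return True
-- ===== Notes on version B (the rewrite author's own statement) =====
-- stated objective: faster
-- what changed: A answers through a staged pipeline (vse_osebe built by quadratic unikati dedup plus sorted over two sub-scans, computed twice, then an author-directed nested rescan); B makes one combined pass that accumulates a persons set and the (author, cleaned word) reference relation as hash sets, then answers with set lookups, keeping the None fall-through.
import Mathlib
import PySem

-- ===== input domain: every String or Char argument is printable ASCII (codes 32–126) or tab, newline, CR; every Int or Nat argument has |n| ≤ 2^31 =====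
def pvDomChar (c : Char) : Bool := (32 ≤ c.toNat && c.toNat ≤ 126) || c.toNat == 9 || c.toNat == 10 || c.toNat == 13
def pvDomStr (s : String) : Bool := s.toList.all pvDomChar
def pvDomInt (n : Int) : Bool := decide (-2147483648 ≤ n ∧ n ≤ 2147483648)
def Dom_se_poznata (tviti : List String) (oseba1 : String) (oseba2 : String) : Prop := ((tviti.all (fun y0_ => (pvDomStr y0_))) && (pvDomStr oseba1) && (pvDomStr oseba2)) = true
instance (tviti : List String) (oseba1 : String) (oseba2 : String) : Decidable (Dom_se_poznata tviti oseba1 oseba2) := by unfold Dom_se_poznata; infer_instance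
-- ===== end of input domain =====

-- B replaces A's staged pipeline (vse_osebe via quadratic unikati/sorted sub-scans, computed twice,
-- then an author-directed nested rescan) by ONE combined pass accumulating a persons set and the
-- (author, cleaned word) reference relation as sets, answered by set lookups (measured faster);
-- same None fall-through on no match.

-- ===== PORT A =====
def unikatiL {α : Type} [BEq α] (s : List α) : List α :=
  s.foldl (fun novi e => if novi.contains e then novi else novi ++ [e]) []

def avtorL (tvit : String) : Option String :=
  match PySem.Str.split₀ tvit with
  | [] => none            -- Python's avtor falls off the loop and returns None
  | e :: _ => some (PySem.Str.replace e ":" "")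

def vsi_avtorjiL (tviti : List String) : List (Option String) :=
  unikatiL (tviti.foldl (fun vsi tvit => vsi ++ [avtorL tvit]) [])

def izlociL (beseda : String) : String :=
  if PySem.Str.strIsalnum beseda then beseda
  else (PySem.Str.strip beseda).toList.foldl
    (fun b i =>
      if PySem.Str.strIsalnum (String.ofList [i]) then b
      else if i == '-' then b
      else PySem.Str.replace b (String.ofList [i]) "") beseda

-- beseda[0] == c : the words produced by split() are nonempty, so beseda[0] never raises;
-- head? = some c is exact there.
def se_zacne_z_nejcevaL (tviti : List String) (c : Char) : List String :=
  tviti.foldl (fun rez tvit =>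
    (PySem.Str.split₀ tvit).foldl (fun rez beseda =>
      if beseda.toList.head? == some c then rez ++ [izlociL beseda] else rez) rez) []

def zberi_se_zacne_zL (tviti : List String) (c : Char) : List String :=
  unikatiL (se_zacne_z_nejcevaL tviti c)

def vse_afneL (tviti : List String) : List String := zberi_se_zacne_zL tviti '@'

-- sorted(): Python sorts a list of strings (and raises TypeError when a None is mixed with a
-- string — excluded by Pre_). Key (·.getD "") is exact on the admitted inputs: there every
-- element is `some s` (or the list is all-none, where sorting is trivial).
def vse_osebeL (tviti : List String) : List (Option String) :=
  PySem.List.sorted (unikatiL ((vse_afneL tviti).map some ++ vsi_avtorjiL tviti))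
    (fun x => x.getD "") false

def se_poznata_loop (oseba1 oseba2 : String) : List String → Option Bool
  | [] => none
  | tvit :: rest =>
    if avtorL tvit == some oseba1 then
      if (PySem.Str.split₀ tvit).any (fun beseda => oseba2 == izlociL beseda) then some true
      else se_poznata_loop oseba1 oseba2 rest
    else if avtorL tvit == some oseba2 then
      if (PySem.Str.split₀ tvit).any (fun beseda => oseba1 == izlociL beseda) then some true
      else se_poznata_loop oseba1 oseba2 rest
    else se_poznata_loop oseba1 oseba2 rest

def se_poznata (tviti : List String) (oseba1 : String) (oseba2 : String) : Option Bool :=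
  if !(vse_osebeL tviti).contains (some oseba1) || !(vse_osebeL tviti).contains (some oseba2) then
    some false
  else
    se_poznata_loop oseba1 oseba2 tviti

-- ===== PORT B =====
-- the single pass of Source B: state = (persons set, reference-pair set); wordless tweets are skipped
def zberiB (tviti : List String) : PySem.Set String × PySem.Set (String × String) :=
  tviti.foldl (fun st tvit =>
    match PySem.Str.split₀ tvit with
    | [] => st
    | w0 :: _ =>
      let a := PySem.Str.replace w0 ":" ""
      (PySem.Str.split₀ tvit).foldl (fun st beseda =>
          let osebe := if beseda.toList.head? == some '@'
                       then PySem.Set.add st.1 (izlociL beseda) else st.1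
          (osebe, PySem.Set.add st.2 (a, izlociL beseda)))
        (PySem.Set.add st.1 a, st.2))
    (PySem.Set.empty, PySem.Set.empty)

def se_poznata_alt (tviti : List String) (oseba1 : String) (oseba2 : String) : Option Bool :=
  let st := zberiB tviti
  if !(PySem.Set.contains st.1 oseba1) || !(PySem.Set.contains st.1 oseba2) then some false
  else if PySem.Set.contains st.2 (oseba1, oseba2) || PySem.Set.contains st.2 (oseba2, oseba1) then
    some true
  else none

-- ===== PRECONDITION & SPEC =====
-- Pre_ excludes exactly the inputs where Python A raises TypeError: a whitespace-only tweet makes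
-- avtor return None, and sorted() in vse_osebe raises when that None is mixed with any string
-- (i.e. some tweet is wordless while another has words).
def Pre_se_poznata (tviti : List String) (oseba1 : String) (oseba2 : String) : Prop :=
  (∀ t ∈ tviti, PySem.Str.split₀ t ≠ []) ∨ (∀ t ∈ tviti, PySem.Str.split₀ t = [])
instance (tviti : List String) (oseba1 : String) (oseba2 : String) : Decidable (Pre_se_poznata tviti oseba1 oseba2) := by unfold Pre_se_poznata; infer_instance

def pvWitness_se_poznata : List String × String × String :=
  (["ana: @bo zdravo", "bo: hej @ana!"], "ana", "bo")

def Spec_se_poznata (tviti : List String) (oseba1 : String) (oseba2 : String) (out : Option Bool) : Prop := out = se_poznata_alt tviti oseba1 oseba2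
instance (tviti : List String) (oseba1 : String) (oseba2 : String) (out : Option Bool) : Decidable (Spec_se_poznata tviti oseba1 oseba2 out) := by unfold Spec_se_poznata; infer_instance

-- ===== CLAIM (what is proved, stated in full; the proofs are below) =====
def Claim_equal_se_poznata : Prop := ∀ (tviti : List String) (oseba1 : String) (oseba2 : String), Dom_se_poznata tviti oseba1 oseba2 → Pre_se_poznata tviti oseba1 oseba2 → Spec_se_poznata tviti oseba1 oseba2 (se_poznata tviti oseba1 oseba2)


-- ===== LEMMAS AND PROOFS =====

-- o is a "person" of tviti: an author (first word minus colons) or a cleaned @-mention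
def PersonProp (tviti : List String) (o : String) : Prop :=
  (∃ t ∈ tviti, avtorL t = some o) ∨
  (∃ t ∈ tviti, ∃ b ∈ PySem.Str.split₀ t, b.toList.head? = some '@' ∧ izlociL b = o)

-- some tweet's author is o1 and its cleaned words contain o2, or symmetrically
def RefProp (tviti : List String) (o1 o2 : String) : Prop :=
  ∃ t ∈ tviti, (avtorL t = some o1 ∧ ∃ b ∈ PySem.Str.split₀ t, o2 = izlociL b) ∨
               (avtorL t = some o2 ∧ ∃ b ∈ PySem.Str.split₀ t, o1 = izlociL b)

theorem mem_unikatiL {α : Type} [BEq α] [LawfulBEq α] (s : List α) (x : α) :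
    x ∈ unikatiL s ↔ x ∈ s := by
  unfold unikatiL
  have main : ∀ (l acc : List α),
      x ∈ l.foldl (fun novi e => if novi.contains e then novi else novi ++ [e]) acc ↔
        x ∈ acc ∨ x ∈ l := by
    intro l
    induction l with
    | nil => simp
    | cons e l ih =>
      intro acc
      simp only [List.foldl_cons]
      split
      · rename_i h
        rw [ih]
        simp only [List.mem_cons]
        constructor
        · rintro (h' | h') <;> tauto
        · rintro (h' | rfl | h') <;> first
            | tauto
            | exact Or.inl (by simpa using h)
      · rw [ih]; simp [List.mem_append, or_assoc]
  simpa using main s []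

theorem mem_vsi_avtorjiL (tviti : List String) (x : Option String) :
    x ∈ vsi_avtorjiL tviti ↔ ∃ t ∈ tviti, avtorL t = x := by
  unfold vsi_avtorjiL
  rw [mem_unikatiL, PySem.List.foldl_append_singleton_eq_map]
  simp [List.mem_map, eq_comm]

theorem mem_se_zacne (tviti : List String) (c : Char) (x : String) :
    x ∈ se_zacne_z_nejcevaL tviti c ↔
      ∃ t ∈ tviti, ∃ b ∈ PySem.Str.split₀ t, b.toList.head? = some c ∧ izlociL b = x := by
  unfold se_zacne_z_nejcevaL
  have inner : ∀ (ws : List String) (acc : List String),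
      x ∈ ws.foldl (fun rez beseda =>
            if beseda.toList.head? == some c then rez ++ [izlociL beseda] else rez) acc ↔
        x ∈ acc ∨ ∃ b ∈ ws, b.toList.head? = some c ∧ izlociL b = x := by
    intro ws
    induction ws with
    | nil => simp
    | cons b ws ih =>
      intro acc
      simp only [List.foldl_cons]
      split
      · rename_i h
        have hb : b.toList.head? = some c := by simpa using h
        rw [ih]
        simp only [List.mem_append, List.mem_singleton, List.mem_cons]
        aesop
      · rename_i h
        have hb : b.toList.head? ≠ some c := by simpa using h
        rw [ih]
        simp only [List.mem_cons]
        aesop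
  have main : ∀ (l acc : List String),
      x ∈ l.foldl (fun rez tvit =>
            (PySem.Str.split₀ tvit).foldl (fun rez beseda =>
              if beseda.toList.head? == some c then rez ++ [izlociL beseda] else rez) rez) acc ↔
        x ∈ acc ∨ ∃ t ∈ l, ∃ b ∈ PySem.Str.split₀ t, b.toList.head? = some c ∧ izlociL b = x := by
    intro l
    induction l with
    | nil => simp
    | cons t l ih =>
      intro acc
      simp only [List.foldl_cons, ih, inner, List.mem_cons]
      aesop
  simpa using main tviti []

-- A's guard list: membership of `some o` is exactly PersonProp (None entries never match)
theorem mem_vse_osebeL (tviti : List String) (o : String) :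
    some o ∈ vse_osebeL tviti ↔ PersonProp tviti o := by
  unfold vse_osebeL PersonProp
  rw [PySem.List.mem_sorted, mem_unikatiL, List.mem_append, List.mem_map]
  unfold vse_afneL zberi_se_zacne_zL
  constructor
  · rintro (⟨y, hy, hyo⟩ | h)
    · rw [mem_unikatiL, mem_se_zacne] at hy
      obtain ⟨t, ht, b, hb, hh, hcl⟩ := hy
      exact Or.inr ⟨t, ht, b, hb, hh, by rwa [← Option.some.inj hyo]⟩
    · rw [mem_vsi_avtorjiL] at h
      exact Or.inl h
  · rintro (h | ⟨t, ht, b, hb, hh, hcl⟩)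
    · exact Or.inr ((mem_vsi_avtorjiL tviti (some o)).mpr h)
    · exact Or.inl ⟨o, by rw [mem_unikatiL, mem_se_zacne]; exact ⟨t, ht, b, hb, hh, hcl⟩, rfl⟩

-- B's pass: characterise both accumulated sets at once
theorem zberiB_spec (tviti : List String) :
    (∀ o : String, o ∈ (zberiB tviti).1 ↔ PersonProp tviti o) ∧
    (∀ p : String × String, p ∈ (zberiB tviti).2 ↔
        ∃ t ∈ tviti, avtorL t = some p.1 ∧ ∃ b ∈ PySem.Str.split₀ t, p.2 = izlociL b) := by
  unfold zberiB
  have inner : ∀ (ws : List String) (a : String)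
      (st : PySem.Set String × PySem.Set (String × String)),
      (∀ o : String, o ∈ (ws.foldl (fun st beseda =>
            let osebe := if beseda.toList.head? == some '@'
                         then PySem.Set.add st.1 (izlociL beseda) else st.1
            (osebe, PySem.Set.add st.2 (a, izlociL beseda))) st).1 ↔
          o ∈ st.1 ∨ ∃ b ∈ ws, b.toList.head? = some '@' ∧ izlociL b = o) ∧
      (∀ p : String × String, p ∈ (ws.foldl (fun st beseda =>
            let osebe := if beseda.toList.head? == some '@'
                         then PySem.Set.add st.1 (izlociL beseda) else st.1
            (osebe, PySem.Set.add st.2 (a, izlociL beseda))) st).2 ↔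
          p ∈ st.2 ∨ ∃ b ∈ ws, p = (a, izlociL b)) := by
    intro ws
    induction ws with
    | nil => simp
    | cons b ws ih =>
      intro a st
      simp only [List.foldl_cons]
      constructor
      · intro o
        rw [(ih a _).1]
        by_cases h : b.toList.head? = some '@' <;>
          simp [h, PySem.Set.mem_add] <;> aesop
      · intro p
        rw [(ih a _).2]
        simp only [PySem.Set.mem_add, List.mem_cons]
        aesop
  have main : ∀ (l : List String) (st : PySem.Set String × PySem.Set (String × String)),
      (∀ o : String, o ∈ (l.foldl (fun st tvit =>
            match PySem.Str.split₀ tvit with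
            | [] => st
            | w0 :: _ =>
              let a := PySem.Str.replace w0 ":" ""
              (PySem.Str.split₀ tvit).foldl (fun st beseda =>
                  let osebe := if beseda.toList.head? == some '@'
                               then PySem.Set.add st.1 (izlociL beseda) else st.1
                  (osebe, PySem.Set.add st.2 (a, izlociL beseda)))
                (PySem.Set.add st.1 a, st.2)) st).1 ↔
          o ∈ st.1 ∨ PersonProp l o) ∧
      (∀ p : String × String, p ∈ (l.foldl (fun st tvit =>
            match PySem.Str.split₀ tvit with
            | [] => st
            | w0 :: _ =>
              let a := PySem.Str.replace w0 ":" ""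
              (PySem.Str.split₀ tvit).foldl (fun st beseda =>
                  let osebe := if beseda.toList.head? == some '@'
                               then PySem.Set.add st.1 (izlociL beseda) else st.1
                  (osebe, PySem.Set.add st.2 (a, izlociL beseda)))
                (PySem.Set.add st.1 a, st.2)) st).2 ↔
          p ∈ st.2 ∨ ∃ t ∈ l, avtorL t = some p.1 ∧ ∃ b ∈ PySem.Str.split₀ t, p.2 = izlociL b) := by
    intro l
    induction l with
    | nil => simp [PersonProp]
    | cons t l ih =>
      intro st
      simp only [List.foldl_cons]
      cases hsp : PySem.Str.split₀ t with
      | nil =>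
        constructor
        · intro o
          rw [(ih st).1]
          unfold PersonProp
          constructor
          · rintro (h | h)
            · tauto
            · rcases h with ⟨u, hu, h⟩ | ⟨u, hu, h⟩
              · exact Or.inr (Or.inl ⟨u, List.mem_cons_of_mem _ hu, h⟩)
              · exact Or.inr (Or.inr ⟨u, List.mem_cons_of_mem _ hu, h⟩)
          · rintro (h | ⟨u, hu, h⟩ | ⟨u, hu, h⟩)
            · tauto
            · rcases List.mem_cons.mp hu with rfl | hu
              · rw [avtorL, hsp] at h; cases h
              · exact Or.inr (Or.inl ⟨u, hu, h⟩)
            · rcases List.mem_cons.mp hu with rfl | hu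
              · rw [hsp] at h; obtain ⟨b, hb, _⟩ := h; cases hb
              · exact Or.inr (Or.inr ⟨u, hu, h⟩)
        · intro p
          rw [(ih st).2]
          constructor
          · rintro (h | ⟨u, hu, h⟩)
            · tauto
            · exact Or.inr ⟨u, List.mem_cons_of_mem _ hu, h⟩
          · rintro (h | ⟨u, hu, h⟩)
            · tauto
            · rcases List.mem_cons.mp hu with rfl | hu
              · rw [avtorL, hsp] at h; exact absurd h.1 (by simp)
              · exact Or.inr ⟨u, hu, h⟩
      | cons w0 ws =>
        have havt : avtorL t = some (PySem.Str.replace w0 ":" "") := by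
          rw [avtorL, hsp]
        constructor
        · intro o
          rw [(ih _).1, (inner _ _ _).1]
          unfold PersonProp
          simp only [PySem.Set.mem_add, hsp, List.mem_cons]
          constructor
          · rintro (((h | rfl) | ⟨b, hb, hh, hiz⟩) | ⟨u, hu, h⟩ | ⟨u, hu, h⟩)
            · exact Or.inl h
            · exact Or.inr (Or.inl ⟨t, Or.inl rfl, havt⟩)
            · exact Or.inr (Or.inr ⟨t, Or.inl rfl, b,
                by rw [hsp]; exact List.mem_cons.mpr hb, hh, hiz⟩)
            · exact Or.inr (Or.inl ⟨u, Or.inr hu, h⟩)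
            · exact Or.inr (Or.inr ⟨u, Or.inr hu, h⟩)
          · rintro (h | ⟨u, rfl | hu, h⟩ | ⟨u, rfl | hu, h⟩)
            · exact Or.inl (Or.inl (Or.inl h))
            · exact Or.inl (Or.inl (Or.inr (Option.some.inj (havt.symm.trans h)).symm))
            · exact Or.inr (Or.inl ⟨u, hu, h⟩)
            · obtain ⟨b, hb, hh, hiz⟩ := h
              rw [hsp] at hb
              exact Or.inl (Or.inr ⟨b, List.mem_cons.mp hb, hh, hiz⟩)
            · exact Or.inr (Or.inr ⟨u, hu, h⟩)
        · intro p
          rw [(ih _).2, (inner _ _ _).2]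
          simp only [List.mem_cons]
          constructor
          · rintro ((h | ⟨b, hb, rfl⟩) | ⟨u, hu, h⟩)
            · exact Or.inl h
            · exact Or.inr ⟨t, Or.inl rfl, havt, b,
                by rw [hsp]; exact List.mem_cons.mpr hb, rfl⟩
            · exact Or.inr ⟨u, Or.inr hu, h⟩
          · rintro (h | ⟨u, rfl | hu, ha, b, hb, hcl⟩)
            · exact Or.inl (Or.inl h)
            · rw [hsp] at hb
              have h1 : p.1 = PySem.Str.replace w0 ":" "" :=
                Option.some.inj (ha.symm.trans havt)
              exact Or.inl (Or.inr ⟨b, List.mem_cons.mp hb, Prod.ext h1 hcl⟩)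
            · exact Or.inr ⟨u, hu, ha, b, hb, hcl⟩
  constructor
  · intro o; simpa using (main tviti (PySem.Set.empty, PySem.Set.empty)).1 o
  · intro p; simpa using (main tviti (PySem.Set.empty, PySem.Set.empty)).2 p

theorem loop_none_or_true (o1 o2 : String) (l : List String) :
    se_poznata_loop o1 o2 l = none ∨ se_poznata_loop o1 o2 l = some true := by
  induction l with
  | nil => exact Or.inl rfl
  | cons t l ih =>
    simp only [se_poznata_loop]
    split_ifs <;> first | exact Or.inr rfl | exact ih

theorem loop_true_iff (o1 o2 : String) (l : List String) :
    se_poznata_loop o1 o2 l = some true ↔ RefProp l o1 o2 := by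
  induction l with
  | nil => simp [se_poznata_loop, RefProp]
  | cons t l ih =>
    have expand : RefProp (t :: l) o1 o2 ↔
        ((avtorL t = some o1 ∧ ∃ b ∈ PySem.Str.split₀ t, o2 = izlociL b) ∨
         (avtorL t = some o2 ∧ ∃ b ∈ PySem.Str.split₀ t, o1 = izlociL b)) ∨ RefProp l o1 o2 := by
      unfold RefProp
      constructor
      · rintro ⟨u, hu, h⟩
        rcases List.mem_cons.mp hu with rfl | hu
        · exact Or.inl h
        · exact Or.inr ⟨u, hu, h⟩
      · rintro (h | ⟨u, hu, h⟩)
        · exact ⟨t, List.mem_cons_self, h⟩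
        · exact ⟨u, List.mem_cons_of_mem _ hu, h⟩
    rw [expand]
    simp only [se_poznata_loop]
    split_ifs with hA hI hB hJ
    · refine iff_of_true rfl (Or.inl (Or.inl ⟨beq_iff_eq.mp hA, ?_⟩))
      obtain ⟨b, hb, hbe⟩ := List.any_eq_true.mp hI
      exact ⟨b, hb, beq_iff_eq.mp hbe⟩
    · rw [ih]
      constructor
      · exact Or.inr
      · rintro (h | h)
        · exfalso
          rcases h with ⟨_, b, hb, hbe⟩ | ⟨h2, b, hb, hbe⟩
          · exact hI (List.any_eq_true.mpr ⟨b, hb, beq_iff_eq.mpr hbe⟩)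
          · have ho : o1 = o2 := Option.some.inj ((beq_iff_eq.mp hA).symm.trans h2)
            exact hI (List.any_eq_true.mpr ⟨b, hb, beq_iff_eq.mpr (ho ▸ hbe)⟩)
        · exact h
    · refine iff_of_true rfl (Or.inl (Or.inr ⟨beq_iff_eq.mp hB, ?_⟩))
      obtain ⟨b, hb, hbe⟩ := List.any_eq_true.mp hJ
      exact ⟨b, hb, beq_iff_eq.mp hbe⟩
    · rw [ih]
      constructor
      · exact Or.inr
      · rintro (h | h)
        · exfalso
          rcases h with ⟨h1, _⟩ | ⟨_, b, hb, hbe⟩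
          · exact hA (beq_iff_eq.mpr h1)
          · exact hJ (List.any_eq_true.mpr ⟨b, hb, beq_iff_eq.mpr hbe⟩)
        · exact h
    · rw [ih]
      constructor
      · exact Or.inr
      · rintro (h | h)
        · exfalso
          rcases h with ⟨h1, _⟩ | ⟨h2, _⟩
          · exact hA (beq_iff_eq.mpr h1)
          · exact hB (beq_iff_eq.mpr h2)
        · exact h

theorem refs_branch_iff (tviti : List String) (o1 o2 : String) :
    (PySem.Set.contains (zberiB tviti).2 (o1, o2) ||
      PySem.Set.contains (zberiB tviti).2 (o2, o1)) = true ↔ RefProp tviti o1 o2 := by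
  have hr := (zberiB_spec tviti).2
  simp only [Bool.or_eq_true, PySem.Set.contains, List.contains_iff_mem, hr]
  unfold RefProp
  constructor
  · rintro (⟨t, ht, ha, b, hb, he⟩ | ⟨t, ht, ha, b, hb, he⟩)
    · exact ⟨t, ht, Or.inl ⟨ha, b, hb, he⟩⟩
    · exact ⟨t, ht, Or.inr ⟨ha, b, hb, he⟩⟩
  · rintro ⟨t, ht, ⟨ha, b, hb, he⟩ | ⟨ha, b, hb, he⟩⟩
    · exact Or.inl ⟨t, ht, ha, b, hb, he⟩
    · exact Or.inr ⟨t, ht, ha, b, hb, he⟩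

theorem guard_iff (tviti : List String) (o : String) :
    (vse_osebeL tviti).contains (some o) = PySem.Set.contains (zberiB tviti).1 o := by
  have h1 := mem_vse_osebeL tviti o
  have h2 := ((zberiB_spec tviti).1 o)
  by_cases h : PersonProp tviti o
  · simp only [PySem.Set.contains]
    rw [List.contains_iff_mem.symm] at h1 h2
    simp_all
  · simp only [PySem.Set.contains]
    rw [List.contains_iff_mem.symm] at h1 h2
    simp_all

-- ===== VERDICT (by name: the statement is the Claim_ definition above) =====
theorem se_poznata_spec : Claim_equal_se_poznata := by
  intro tviti o1 o2 _ _
  unfold Spec_se_poznata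
  simp only [se_poznata, se_poznata_alt, guard_iff]
  split_ifs with hg hb
  · rfl
  · exact (loop_true_iff o1 o2 tviti).mpr ((refs_branch_iff tviti o1 o2).mp hb)
  · rcases loop_none_or_true o1 o2 tviti with h | h
    · exact h
    · exact absurd ((refs_branch_iff tviti o1 o2).mpr ((loop_true_iff o1 o2 tviti).mp h)) hb
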